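-- pv_equiv track=rewrite | github.com/lightningholt/CodeSignalPortfolio | Arcade/Python/mexFunction.py | mexFunction
-- ===== SOURCE A (Python) =====
-- def mexFunction(s, upperBound):
--     '''
--     Find a version of the minimum excludant. Given a set s, and an upper bound,
--     find the minimum non-negative integer that is not in s and less than or
--     equal to the upper bound
--     '''
--     found = -1
--     for i in range(upperBound):
--         if not i in s:
--             found = i
--             break
--     else:
--         if found > upperBound:
--             found=upperBound
--         elif found == -1:
--             found = upperBound
--
--     return found
-- ===== SOURCE B (Python) =====
-- def mexFunction(s, upperBound):
--     mex = 0
--     for v in sorted(set(s)):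
--         if v == mex:
--             mex += 1
--         elif v > mex:
--             break
--     return min(mex, upperBound)
-- ===== Notes on version B (the rewrite author's own statement) =====
-- stated objective: alternative
-- what changed: B computes the mex by sorting the distinct elements of s and walking them until the first gap, then caps with min(mex, upperBound), instead of A's scan over range(upperBound) for the first absent value with a for/else fallback.
import Mathlib
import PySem

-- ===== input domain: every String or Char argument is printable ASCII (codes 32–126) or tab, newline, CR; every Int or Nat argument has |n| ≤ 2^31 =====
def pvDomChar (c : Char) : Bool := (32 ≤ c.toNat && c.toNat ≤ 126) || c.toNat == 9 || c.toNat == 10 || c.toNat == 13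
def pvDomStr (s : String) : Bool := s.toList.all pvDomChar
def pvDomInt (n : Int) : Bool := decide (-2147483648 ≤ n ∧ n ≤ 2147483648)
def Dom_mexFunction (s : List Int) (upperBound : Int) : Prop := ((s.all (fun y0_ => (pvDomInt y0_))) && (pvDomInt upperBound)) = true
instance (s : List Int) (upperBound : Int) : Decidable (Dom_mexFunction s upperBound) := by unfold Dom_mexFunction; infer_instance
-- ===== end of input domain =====

-- B sorts the distinct elements of s once and walks them to find the mex, then caps it
-- with min(mex, upperBound); A scans range(upperBound) for the first gap with a for/else fallback.

-- ===== PORT A =====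
-- A's for-loop over range(upperBound): break returns i; the exhausted loop runs the
-- else block, which on found = -1 always yields upperBound
def mexLoopA (s : List Int) (ub : Int) (found : Int) (i : Int) : Int :=
  if _h : i < ub then
    if ! s.contains i then i else mexLoopA s ub found (i + 1)
  else
    if found > ub then ub else if found = -1 then ub else found
termination_by (ub - i).toNat
decreasing_by omega

def mexFunction (s : List Int) (upperBound : Int) : Int :=
  mexLoopA s upperBound (-1) 0

-- ===== PORT B =====
-- B's for-loop over sorted(set(s)) with the early break
def mexScan (mex : Int) : List Int → Int
  | [] => mex
  | v :: rest =>
    if v = mex then mexScan (mex + 1) rest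
    else if v > mex then mex
    else mexScan mex rest

def mexFunction_alt (s : List Int) (upperBound : Int) : Int :=
  let mex := mexScan 0 (PySem.List.sorted (PySem.Set.ofList s) (fun x => x) false)
  min mex upperBound

-- ===== PRECONDITION & SPEC =====
def Spec_mexFunction (s : List Int) (upperBound : Int) (out : Int) : Prop := out = mexFunction_alt s upperBound
instance (s : List Int) (upperBound : Int) (out : Int) : Decidable (Spec_mexFunction s upperBound out) := by unfold Spec_mexFunction; infer_instance

-- ===== CLAIM (what is proved, stated in full; the proofs are below) =====
def Claim_equal_mexFunction : Prop := ∀ (s : List Int) (upperBound : Int), Dom_mexFunction s upperBound → Spec_mexFunction s upperBound (mexFunction s upperBound)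

-- ===== LEMMAS AND PROOFS =====

-- characterisation of the minimum excludant of s
def IsMex (s : List Int) (m : Int) : Prop :=
  0 ≤ m ∧ m ∉ s ∧ ∀ j : Int, 0 ≤ j → j < m → j ∈ s

-- A's loop from i returns the first element of [i, ub) not in s, else ub
theorem mexLoopA_eq_head (s : List Int) (ub i : Int) :
    mexLoopA s ub (-1) i =
      match (PySem.List.pyRange i ub 1).filter (fun j => ! s.contains j) with
      | [] => ub
      | x :: _ => x := by
  by_cases h : i < ub
  · rw [PySem.List.pyRange_one_cons h, List.filter_cons]
    rw [mexLoopA]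
    simp only [h, dite_true]
    by_cases hm : i ∈ s
    · simpa [hm] using mexLoopA_eq_head s ub (i + 1)
    · simp [hm]
  · rw [mexLoopA]
    simp only [h, dite_false]
    rw [PySem.List.pyRange_one_eq_nil (by omega)]
    show _ = ub
    split_ifs <;> omega
termination_by (ub - i).toNat
decreasing_by omega

-- B's scan computes the mex, given the sorted distinct members of s
theorem mexScan_isMex (s : List Int) (l : List Int) (mex : Int)
    (h1 : 0 ≤ mex)
    (h2 : ∀ j : Int, 0 ≤ j → j < mex → j ∈ s)
    (h3 : ∀ x ∈ s, mex ≤ x → x ∈ l)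
    (h4 : l.Pairwise (· < ·))
    (h5 : ∀ x ∈ l, x ∈ s) :
    IsMex s (mexScan mex l) := by
  induction l generalizing mex with
  | nil =>
    refine ⟨h1, fun hm => ?_, h2⟩
    exact absurd (h3 mex hm le_rfl) (List.not_mem_nil)
  | cons v rest ih =>
    rw [mexScan]
    rcases List.pairwise_cons.mp h4 with ⟨hvlt, hrest⟩
    by_cases hv : v = mex
    · simp only [hv]
      refine ih (mex + 1) (by omega) ?_ ?_ hrest (fun x hx => h5 x (by simp [hx]))
      · intro j hj0 hj
        rcases lt_or_eq_of_le (show j ≤ mex by omega) with h | h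
        · exact h2 j hj0 h
        · subst h; exact hv ▸ h5 v (by simp)
      · intro x hx hmx
        have := h3 x hx (by omega)
        rcases List.mem_cons.mp this with h | h
        · omega
        · exact h
    · by_cases hgt : v > mex
      · simp only [if_neg hv, if_pos hgt]
        refine ⟨h1, fun hm => ?_, h2⟩
        rcases List.mem_cons.mp (h3 mex hm le_rfl) with h | h
        · omega
        · exact absurd (hvlt mex h) (by omega)
      · simp only [if_neg hv, if_neg hgt]
        refine ih mex h1 h2 ?_ hrest (fun x hx => h5 x (by simp [hx]))
        intro x hx hmx
        rcases List.mem_cons.mp (h3 x hx hmx) with h | h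
        · omega
        · exact h

theorem mexFunction_spec : Claim_equal_mexFunction := by
  intro s ub _
  show mexFunction s ub = mexFunction_alt s ub
  unfold mexFunction mexFunction_alt
  set l := PySem.List.sorted (PySem.Set.ofList s) (fun x => x) false with hl
  have hmex : IsMex s (mexScan 0 l) := by
    refine mexScan_isMex s l 0 le_rfl (by omega) ?_ ?_ ?_
    · intro x hx _
      rw [hl, PySem.List.mem_sorted, PySem.Set.mem_ofList]; exact hx
    · exact PySem.List.sorted_ofList_pairwise_lt (xs := s)
    · intro x hx
      rw [hl, PySem.List.mem_sorted, PySem.Set.mem_ofList] at hx; exact hx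
  obtain ⟨hm0, hmnot, hmall⟩ := hmex
  set m := mexScan 0 l with hm
  rw [mexLoopA_eq_head]
  by_cases hcase : m < ub
  · rw [PySem.List.pyRange_one_append 0 m ub hm0 (by omega), List.filter_append]
    have hfst : (PySem.List.pyRange 0 m 1).filter (fun j => ! s.contains j) = [] := by
      rw [List.filter_eq_nil_iff]
      intro j hj
      rw [PySem.List.mem_pyRange_one] at hj
      simp [List.contains_eq_mem, hmall j hj.1 hj.2]
    rw [hfst, List.nil_append, PySem.List.pyRange_one_cons hcase, List.filter_cons]
    simp [hmnot, min_eq_left (le_of_lt hcase)]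
  · have hfilt : (PySem.List.pyRange 0 ub 1).filter (fun j => ! s.contains j) = [] := by
      rw [List.filter_eq_nil_iff]
      intro j hj
      rw [PySem.List.mem_pyRange_one] at hj
      simp [List.contains_eq_mem, hmall j hj.1 (by omega)]
    rw [hfilt]
    simp [min_eq_right (by omega : ub ≤ m)]
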